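-- pv_equiv track=rewrite | github.com/glbter/kpi-computing | comp_discrete_math/matrix_relations.py | transitive
-- ===== SOURCE A (Python) =====
-- def transitive(matrix):
--     transit = 0
--     antitransit = 0
--     for i in range(len(matrix)):
--         for j in range(len(matrix)):
--             for k in range(len(matrix)):
--                 if matrix[i][j] and matrix[j][k] and matrix[i][k] :
--                     transit += 1
--                 elif matrix[i][j] and matrix[j][k] and not matrix[i][k] :
--                     antitransit += 1
--     if transit != 0 and antitransit == 0:
--         return "matrix is transitive"
--     elif transit == 0 and antitransit != 0:
--         return "matrix is antitransitive"
--     elif transit != 0 and antitransit != 0: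
--         return "matrix is not transitive"
--
--     return(transit)
-- ===== SOURCE B (Python) =====
-- def transitive(matrix):
--     n = len(matrix)
--     # bitset rows: bit j of masks[i] is set iff matrix[i][j] is truthy
--     masks = []
--     for i in range(n):
--         row = matrix[i]
--         m = 0
--         for j in range(n):
--             if row[j]:
--                 m |= 1 << j
--         masks.append(m)
--     full = (1 << n) - 1
--     has_t = False
--     has_at = False
--     for i in range(n):
--         comp = 0  # bitset of k with (i,j),(j,k) truthy for some j
--         for j in range(n):
--             if masks[i] >> j & 1:
--                 comp |= masks[j]
--         if comp & masks[i]: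
--             has_t = True
--         if comp & (full ^ masks[i]):
--             has_at = True
--     if has_t and not has_at:
--         return "matrix is transitive"
--     if has_at and not has_t:
--         return "matrix is antitransitive"
--     if has_t and has_at:
--         return "matrix is not transitive"
--     return 0
-- ===== Notes on version B (the rewrite author's own statement) =====
-- stated objective: faster
-- what changed: Replaces A's triple-nested counting loops with a bitset boolean-matrix product: each row becomes an integer bitmask, the composition row comp_i is an OR of masks[j] over set bits j of masks[i], and the two flags come from comp_i AND masks[i] / comp_i AND NOT masks[i]; same three string results.
-- outside the precondition, e.g. on transitive([[0]]): A returns 0, B returns 0; on transitive([]): A returns 0, B returns 0; on transitive([[1, 1], [1]]): A raises IndexError, B raises IndexError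
import Mathlib
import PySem

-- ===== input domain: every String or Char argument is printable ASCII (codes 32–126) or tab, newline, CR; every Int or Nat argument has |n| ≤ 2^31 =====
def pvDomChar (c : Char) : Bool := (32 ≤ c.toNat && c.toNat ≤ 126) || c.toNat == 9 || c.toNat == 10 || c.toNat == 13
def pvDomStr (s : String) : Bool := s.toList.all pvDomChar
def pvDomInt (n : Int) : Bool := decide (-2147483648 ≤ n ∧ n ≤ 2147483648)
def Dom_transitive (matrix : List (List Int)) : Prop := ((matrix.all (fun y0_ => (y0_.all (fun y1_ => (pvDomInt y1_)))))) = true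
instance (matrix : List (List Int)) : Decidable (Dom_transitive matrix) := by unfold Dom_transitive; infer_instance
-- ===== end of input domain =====

-- B replaces A's triple-nested counting loops with a bitset boolean-matrix product: rows become
-- integer bitmasks, comp_i is an OR of masks[j] over set bits j of masks[i], and the two flags are
-- bitwise AND tests; a timing run measured B faster by word-parallelism (same O(n^3) bit ops).


-- ===== PORT A =====
def transitive (matrix : List (List Int)) : String :=
  let n : Int := matrix.length
  let r := PySem.List.pyRange 0 n 1
  let p := r.foldl (fun s i =>
    r.foldl (fun s j =>
      r.foldl (fun s k =>
        if PySem.List.pyGetD (PySem.List.pyGetD matrix i []) j 0 ≠ 0 ∧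
           PySem.List.pyGetD (PySem.List.pyGetD matrix j []) k 0 ≠ 0 ∧
           PySem.List.pyGetD (PySem.List.pyGetD matrix i []) k 0 ≠ 0 then (s.1 + 1, s.2)
        else if PySem.List.pyGetD (PySem.List.pyGetD matrix i []) j 0 ≠ 0 ∧
                PySem.List.pyGetD (PySem.List.pyGetD matrix j []) k 0 ≠ 0 ∧
                PySem.List.pyGetD (PySem.List.pyGetD matrix i []) k 0 = 0 then (s.1, s.2 + 1)
        else s) s) s) ((0 : Int), (0 : Int))
  if p.1 ≠ 0 ∧ p.2 = 0 then "matrix is transitive"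
  else if p.1 = 0 ∧ p.2 ≠ 0 then "matrix is antitransitive"
  else if p.1 ≠ 0 ∧ p.2 ≠ 0 then "matrix is not transitive"
  else PySem.Int.toStr p.1  -- Python returns the int 0 here (not a string); excluded by Pre_

-- ===== PORT B =====
-- Source B's bitmask build loop; bit j of the mask of row i is set iff matrix[i][j] is truthy.
-- (indices are in range under Pre_, so getD is exact for matrix[i] / row[j])
def pvMaskRow (matrix : List (List Int)) (n i : Nat) : Nat :=
  (List.range n).foldl (fun m j =>
    if (matrix.getD i []).getD j 0 != 0 then m ||| (1 <<< j) else m) 0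

def transitive_alt (matrix : List (List Int)) : String :=
  let n := matrix.length
  let masks : List Nat := (List.range n).map (pvMaskRow matrix n)
  let full : Nat := (1 <<< n) - 1
  -- Source B's flag loop over i: comp is the OR of masks[j] over set bits j of masks[i]
  -- (`masks[i] >> j & 1` is exactly Nat.testBit); then the two bitwise AND tests.
  let flags := (List.range n).foldl (fun (s : Bool × Bool) i =>
    let comp := (List.range n).foldl (fun c j =>
      if (masks.getD i 0).testBit j then c ||| masks.getD j 0 else c) 0
    (s.1 || decide (comp &&& masks.getD i 0 ≠ 0),
     s.2 || decide (comp &&& (full ^^^ masks.getD i 0) ≠ 0))) (false, false)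
  if flags.1 && !flags.2 then "matrix is transitive"
  else if flags.2 && !flags.1 then "matrix is antitransitive"
  else if flags.1 && flags.2 then "matrix is not transitive"
  else PySem.Int.toStr 0

-- ===== PRECONDITION & SPEC =====
-- Pre_ excludes inputs where A raises IndexError (some row shorter than the matrix) and inputs
-- with no truthy composition matrix[i][j], matrix[j][k] (including the empty matrix), on which
-- A (and B) return the Python integer 0 — not a value of the declared String return type.
def Pre_transitive (matrix : List (List Int)) : Prop :=
  (∀ row ∈ matrix, matrix.length ≤ row.length) ∧
  ∃ i < matrix.length, ∃ j < matrix.length, ∃ k < matrix.length,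
    (matrix.getD i []).getD j 0 ≠ 0 ∧ (matrix.getD j []).getD k 0 ≠ 0
instance (matrix : List (List Int)) : Decidable (Pre_transitive matrix) := by
  unfold Pre_transitive; infer_instance

def pvWitness_transitive : List (List Int) := [[1, 0], [0, 0]]

def Spec_transitive (matrix : List (List Int)) (out : String) : Prop := out = transitive_alt matrix
instance (matrix : List (List Int)) (out : String) : Decidable (Spec_transitive matrix out) := by
  unfold Spec_transitive; infer_instance

-- ===== CLAIM (what is proved, stated in full; the proofs are below) =====
def Claim_equal_transitive : Prop := ∀ (matrix : List (List Int)), Dom_transitive matrix → Pre_transitive matrix → Spec_transitive matrix (transitive matrix)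

-- ===== LEMMAS AND PROOFS =====

-- m[i][j] via Python indexing with default (in range under Pre_), Int and Nat index versions
def gM (m : List (List Int)) (i j : Int) : Int :=
  PySem.List.pyGetD (PySem.List.pyGetD m i []) j 0
def gN (m : List (List Int)) (i j : Nat) : Int :=
  (m.getD i []).getD j 0

lemma gM_natCast (m : List (List Int)) (i j : Nat) : gM m (i : Int) (j : Int) = gN m i j := by
  simp [gM, gN, PySem.List.pyGetD_natCast]

-- the two classification conditions of A's innermost branch
def Pt (m : List (List Int)) (i j k : Int) : Bool := gM m i j != 0 && gM m j k != 0 && gM m i k != 0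
def Qt (m : List (List Int)) (i j k : Int) : Bool := gM m i j != 0 && gM m j k != 0 && gM m i k == 0

-- the existentials both programs decide
def ET (m : List (List Int)) : Prop :=
  ∃ i < m.length, ∃ j < m.length, ∃ k < m.length, gN m i j ≠ 0 ∧ gN m j k ≠ 0 ∧ gN m i k ≠ 0
def EA (m : List (List Int)) : Prop :=
  ∃ i < m.length, ∃ j < m.length, ∃ k < m.length, gN m i j ≠ 0 ∧ gN m j k ≠ 0 ∧ gN m i k = 0

-- ---- A side: the counter fold counts Pt/Qt triples ----

lemma inner_eval (m : List (List Int)) (i j : Int) (l : List Int) (s : Int × Int) :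
    l.foldl (fun s k =>
        if gM m i j ≠ 0 ∧ gM m j k ≠ 0 ∧ gM m i k ≠ 0 then (s.1 + 1, s.2)
        else if gM m i j ≠ 0 ∧ gM m j k ≠ 0 ∧ gM m i k = 0 then (s.1, s.2 + 1)
        else s) s
      = (s.1 + (l.countP (Pt m i j) : Int),
         s.2 + (l.countP (Qt m i j) : Int)) := by
  induction l generalizing s with
  | nil => simp
  | cons a l ih =>
    rw [List.foldl_cons, ih]
    by_cases h1 : gM m i j ≠ 0 ∧ gM m j a ≠ 0 ∧ gM m i a ≠ 0 <;>
      by_cases h2 : gM m i j ≠ 0 ∧ gM m j a ≠ 0 ∧ gM m i a = 0 <;>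
      simp [Pt, Qt, List.countP_cons, h1, h2, Prod.ext_iff] <;>
      push_cast <;> omega

lemma sumInt_nonneg {α : Type} (l : List α) (u : α → Int) (h : ∀ x ∈ l, 0 ≤ u x) : 0 ≤ (l.map u).sum := by
  induction l with
  | nil => simp
  | cons a l ih =>
    simp only [List.map_cons, List.sum_cons]
    have := h a (by simp)
    have := ih (fun x hx => h x (by simp [hx]))
    omega

lemma sumInt_eq_zero_iff {α : Type} (l : List α) (u : α → Int) (h : ∀ x ∈ l, 0 ≤ u x) :
    (l.map u).sum = 0 ↔ ∀ x ∈ l, u x = 0 := by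
  induction l with
  | nil => simp
  | cons a l ih =>
    simp only [List.map_cons, List.sum_cons, List.mem_cons]
    have h1 := h a (by simp)
    have h2 := sumInt_nonneg l u (fun x hx => h x (by simp [hx]))
    rw [show ((u a + (l.map u).sum = 0) ↔ (u a = 0 ∧ (l.map u).sum = 0)) from by omega,
        ih (fun x hx => h x (by simp [hx]))]
    constructor
    · rintro ⟨ha, hl⟩ x (rfl | hx)
      · exact ha
      · exact hl x hx
    · intro hall
      exact ⟨hall a (Or.inl rfl), fun x hx => hall x (Or.inr hx)⟩

def cT (m : List (List Int)) (l : List Int) (i j : Int) : Int :=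
  (l.countP (Pt m i j) : Int)
def cA (m : List (List Int)) (l : List Int) (i j : Int) : Int :=
  (l.countP (Qt m i j) : Int)

lemma mid_eval (m : List (List Int)) (i : Int) (r l : List Int) (s : Int × Int) :
    l.foldl (fun s j => r.foldl (fun s k =>
        if gM m i j ≠ 0 ∧ gM m j k ≠ 0 ∧ gM m i k ≠ 0 then (s.1 + 1, s.2)
        else if gM m i j ≠ 0 ∧ gM m j k ≠ 0 ∧ gM m i k = 0 then (s.1, s.2 + 1)
        else s) s) s
      = (s.1 + (l.map (cT m r i)).sum, s.2 + (l.map (cA m r i)).sum) := by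
  induction l generalizing s with
  | nil => simp
  | cons a l ih =>
    rw [List.foldl_cons, inner_eval, ih]
    simp only [List.map_cons, List.sum_cons, cT, cA, Prod.mk.injEq]
    constructor <;> ring

lemma outer_eval (m : List (List Int)) (r l : List Int) (s : Int × Int) :
    l.foldl (fun s i => r.foldl (fun s j => r.foldl (fun s k =>
        if gM m i j ≠ 0 ∧ gM m j k ≠ 0 ∧ gM m i k ≠ 0 then (s.1 + 1, s.2)
        else if gM m i j ≠ 0 ∧ gM m j k ≠ 0 ∧ gM m i k = 0 then (s.1, s.2 + 1)
        else s) s) s) s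
      = (s.1 + (l.map (fun i => ((r.map (cT m r i)).sum))).sum,
         s.2 + (l.map (fun i => ((r.map (cA m r i)).sum))).sum) := by
  induction l generalizing s with
  | nil => simp
  | cons a l ih =>
    rw [List.foldl_cons, mid_eval, ih]
    simp only [List.map_cons, List.sum_cons, Prod.mk.injEq]
    constructor <;> ring

lemma sum2_ne_zero_iff (m : List (List Int)) (r : List Int)
    (c : List (List Int) → List Int → Int → Int → Int)
    (hc : ∀ i j, 0 ≤ c m r i j) :
    (r.map (fun i => (r.map (c m r i)).sum)).sum ≠ 0 ↔ ∃ i ∈ r, ∃ j ∈ r, c m r i j ≠ 0 := by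
  rw [Ne, sumInt_eq_zero_iff _ _ (fun i _ => sumInt_nonneg _ _ (fun j _ => hc i j))]
  push_neg
  constructor
  · rintro ⟨i, hi, hne⟩
    rw [Ne, sumInt_eq_zero_iff _ _ (fun j _ => hc i j)] at hne
    push_neg at hne
    exact ⟨i, hi, hne⟩
  · rintro ⟨i, hi, j, hj, hne⟩
    refine ⟨i, hi, ?_⟩
    rw [Ne, sumInt_eq_zero_iff _ _ (fun j _ => hc i j)]
    push_neg
    exact ⟨j, hj, hne⟩

lemma cT_ne_iff (m : List (List Int)) (r : List Int) (i j : Int) :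
    cT m r i j ≠ 0 ↔ ∃ k ∈ r, Pt m i j k = true := by
  simp [cT, List.countP_eq_zero, ← ne_eq, Int.natCast_ne_zero, ← Nat.pos_iff_ne_zero]

lemma cA_ne_iff (m : List (List Int)) (r : List Int) (i j : Int) :
    cA m r i j ≠ 0 ↔ ∃ k ∈ r, Qt m i j k = true := by
  simp [cA, List.countP_eq_zero, ← ne_eq, Int.natCast_ne_zero, ← Nat.pos_iff_ne_zero]

-- Int-indexed triple existentials over pyRange are the Nat-indexed ET/EA
lemma exists_r_ET (m : List (List Int)) :
    (∃ i ∈ PySem.List.pyRange 0 (m.length : Int) 1, ∃ j ∈ PySem.List.pyRange 0 (m.length : Int) 1,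
      ∃ k ∈ PySem.List.pyRange 0 (m.length : Int) 1, Pt m i j k = true) ↔ ET m := by
  simp only [PySem.List.mem_pyRange_one, Pt, Bool.and_eq_true, bne_iff_ne, ne_eq, ET]
  constructor
  · rintro ⟨i, hi, j, hj, k, hk, ⟨hij, hjk⟩, hik⟩
    have hi' : (i.toNat : Int) = i := Int.toNat_of_nonneg (by omega)
    have hj' : (j.toNat : Int) = j := Int.toNat_of_nonneg (by omega)
    have hk' : (k.toNat : Int) = k := Int.toNat_of_nonneg (by omega)
    refine ⟨i.toNat, by omega, j.toNat, by omega, k.toNat, by omega, ?_, ?_, ?_⟩ <;>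
      rw [← gM_natCast] <;> simp only [hi', hj', hk'] <;> assumption
  · rintro ⟨i, hi, j, hj, k, hk, hij, hjk, hik⟩
    exact ⟨i, by omega, j, by omega, k, by omega,
      ⟨by rw [gM_natCast]; exact hij, by rw [gM_natCast]; exact hjk⟩, by rw [gM_natCast]; exact hik⟩

lemma exists_r_EA (m : List (List Int)) :
    (∃ i ∈ PySem.List.pyRange 0 (m.length : Int) 1, ∃ j ∈ PySem.List.pyRange 0 (m.length : Int) 1,
      ∃ k ∈ PySem.List.pyRange 0 (m.length : Int) 1, Qt m i j k = true) ↔ EA m := by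
  simp only [PySem.List.mem_pyRange_one, Qt, Bool.and_eq_true, bne_iff_ne, beq_iff_eq, ne_eq, EA]
  constructor
  · rintro ⟨i, hi, j, hj, k, hk, ⟨hij, hjk⟩, hik⟩
    have hi' : (i.toNat : Int) = i := Int.toNat_of_nonneg (by omega)
    have hj' : (j.toNat : Int) = j := Int.toNat_of_nonneg (by omega)
    have hk' : (k.toNat : Int) = k := Int.toNat_of_nonneg (by omega)
    refine ⟨i.toNat, by omega, j.toNat, by omega, k.toNat, by omega, ?_, ?_, ?_⟩ <;>
      rw [← gM_natCast] <;> simp only [hi', hj', hk'] <;> assumption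
  · rintro ⟨i, hi, j, hj, k, hk, hij, hjk, hik⟩
    exact ⟨i, by omega, j, by omega, k, by omega,
      ⟨by rw [gM_natCast]; exact hij, by rw [gM_natCast]; exact hjk⟩, by rw [gM_natCast]; exact hik⟩

-- ---- B side: bit-level characterization of the masks and the flag loop ----

lemma testBit_foldl_or (l : List Nat) (h : Nat → Bool) (v : Nat → Nat) (acc b : Nat) :
    (l.foldl (fun c j => if h j then c ||| v j else c) acc).testBit b
      = (acc.testBit b || l.any fun j => h j && (v j).testBit b) := by
  induction l generalizing acc with
  | nil => simp
  | cons a l ih =>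
    rw [List.foldl_cons, ih]
    cases ha : h a <;> simp [ha, Nat.testBit_or, Bool.or_assoc]

lemma any_range_eq (n b : Nat) (f : Nat → Bool) :
    ((List.range n).any fun j => f j && j == b) = (decide (b < n) && f b) := by
  rw [Bool.eq_iff_iff]
  simp only [List.any_eq_true, List.mem_range, Bool.and_eq_true, beq_iff_eq, decide_eq_true_eq]
  constructor
  · rintro ⟨j, hj, hf, rfl⟩; exact ⟨hj, hf⟩
  · rintro ⟨hb, hf⟩; exact ⟨b, hb, hf, rfl⟩

lemma testBit_maskRow (m : List (List Int)) (n i b : Nat) :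
    (pvMaskRow m n i).testBit b = (decide (b < n) && (gN m i b != 0)) := by
  unfold pvMaskRow
  rw [testBit_foldl_or]
  simp only [Nat.zero_testBit, Bool.false_or, Nat.one_shiftLeft, Nat.testBit_two_pow]
  exact any_range_eq n b (fun j => gN m i j != 0)

lemma and_ne_zero_iff (x y : Nat) : x &&& y ≠ 0 ↔ ∃ b, x.testBit b ∧ y.testBit b := by
  constructor
  · intro h
    obtain ⟨b, hb⟩ := Nat.exists_testBit_of_ne_zero h
    rw [Nat.testBit_and, Bool.and_eq_true] at hb
    exact ⟨b, hb⟩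
  · rintro ⟨b, hx, hy⟩ h0
    have := Nat.testBit_and x y b
    rw [h0, Nat.zero_testBit, hx, hy] at this
    simp at this

lemma foldl_pair_or (l : List Nat) (F G : Nat → Bool) (s : Bool × Bool) :
    l.foldl (fun s i => (s.1 || F i, s.2 || G i)) s = (s.1 || l.any F, s.2 || l.any G) := by
  induction l generalizing s with
  | nil => simp
  | cons a l ih => rw [List.foldl_cons, ih]; simp [Bool.or_assoc]

-- bit b of comp_i (the fold in transitive_alt, with masks already rewritten to pvMaskRow)
lemma testBit_comp (m : List (List Int)) (n i b : Nat) :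
    (((List.range n).foldl (fun c j =>
        if (pvMaskRow m n i).testBit j then c ||| pvMaskRow m n j else c) 0).testBit b)
      = ((List.range n).any fun j => (pvMaskRow m n i).testBit j && (pvMaskRow m n j).testBit b) := by
  rw [testBit_foldl_or]
  simp

lemma hasT_iff_ET (m : List (List Int)) :
    (((List.range m.length).any fun i =>
        decide (((List.range m.length).foldl (fun c j =>
            if (pvMaskRow m m.length i).testBit j then c ||| pvMaskRow m m.length j else c) 0)
          &&& pvMaskRow m m.length i ≠ 0)) = true) ↔ ET m := by
  simp only [List.any_eq_true, List.mem_range, decide_eq_true_eq]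
  constructor
  · rintro ⟨i, hi, hne⟩
    obtain ⟨b, hcb, hib⟩ := (and_ne_zero_iff _ _).mp hne
    rw [testBit_comp] at hcb
    rw [testBit_maskRow, Bool.and_eq_true, decide_eq_true_eq, bne_iff_ne] at hib
    simp only [List.any_eq_true, List.mem_range, Bool.and_eq_true, testBit_maskRow,
      decide_eq_true_eq, bne_iff_ne] at hcb
    obtain ⟨j, hj, ⟨_, hij⟩, _, hjb⟩ := hcb
    exact ⟨i, hi, j, hj, b, hib.1, hij, hjb, hib.2⟩
  · rintro ⟨i, hi, j, hj, k, hk, hij, hjk, hik⟩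
    refine ⟨i, hi, (and_ne_zero_iff _ _).mpr ⟨k, ?_, ?_⟩⟩
    · rw [testBit_comp]
      simp only [List.any_eq_true, List.mem_range, Bool.and_eq_true, testBit_maskRow,
        decide_eq_true_eq, bne_iff_ne]
      exact ⟨j, hj, ⟨hj, hij⟩, hk, hjk⟩
    · rw [testBit_maskRow]
      simp [hk, hik]

lemma hasAT_iff_EA (m : List (List Int)) :
    (((List.range m.length).any fun i =>
        decide (((List.range m.length).foldl (fun c j =>
            if (pvMaskRow m m.length i).testBit j then c ||| pvMaskRow m m.length j else c) 0)
          &&& (((1 <<< m.length) - 1) ^^^ pvMaskRow m m.length i) ≠ 0)) = true) ↔ EA m := by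
  have hfull : ∀ b : Nat, ((1 <<< m.length) - 1).testBit b = decide (b < m.length) := by
    intro b; rw [Nat.one_shiftLeft]; exact Nat.testBit_two_pow_sub_one m.length b
  simp only [List.any_eq_true, List.mem_range, decide_eq_true_eq]
  constructor
  · rintro ⟨i, hi, hne⟩
    obtain ⟨b, hcb, hib⟩ := (and_ne_zero_iff _ _).mp hne
    rw [testBit_comp] at hcb
    rw [Nat.testBit_xor, hfull, testBit_maskRow] at hib
    simp only [List.any_eq_true, List.mem_range, Bool.and_eq_true, testBit_maskRow,
      decide_eq_true_eq, bne_iff_ne] at hcb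
    obtain ⟨j, hj, ⟨_, hij⟩, hb, hjb⟩ := hcb
    refine ⟨i, hi, j, hj, b, hb, hij, hjb, ?_⟩
    rw [decide_eq_true hb] at hib
    simpa using hib
  · rintro ⟨i, hi, j, hj, k, hk, hij, hjk, hik⟩
    refine ⟨i, hi, (and_ne_zero_iff _ _).mpr ⟨k, ?_, ?_⟩⟩
    · rw [testBit_comp]
      simp only [List.any_eq_true, List.mem_range, Bool.and_eq_true, testBit_maskRow,
        decide_eq_true_eq, bne_iff_ne]
      exact ⟨j, hj, ⟨hj, hij⟩, hk, hjk⟩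
    · rw [Nat.testBit_xor, hfull, testBit_maskRow, decide_eq_true hk]
      simp [hik]

-- ---- main theorem ----

theorem transitive_spec : Claim_equal_transitive := by
  intro m _ hpre
  unfold Spec_transitive transitive transitive_alt
  simp only [show ∀ i j : Int, PySem.List.pyGetD (PySem.List.pyGetD m i []) j 0 = gM m i j
    from fun _ _ => rfl]
  rw [outer_eval]
  simp only [zero_add]
  set r := PySem.List.pyRange 0 (m.length : Int) 1 with hr
  have hTnn : ∀ i j : Int, 0 ≤ cT m r i j := fun i j => Int.natCast_nonneg _
  have hAnn : ∀ i j : Int, 0 ≤ cA m r i j := fun i j => Int.natCast_nonneg _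
  -- A's counters decide ET / EA
  have hTiff : ((r.map (fun i => (r.map (cT m r i)).sum)).sum ≠ 0) ↔ ET m := by
    rw [sum2_ne_zero_iff m r cT hTnn, ← exists_r_ET m, ← hr]
    constructor
    · rintro ⟨i, hi, j, hj, h⟩; exact ⟨i, hi, j, hj, (cT_ne_iff m r i j).mp h⟩
    · rintro ⟨i, hi, j, hj, h⟩; exact ⟨i, hi, j, hj, (cT_ne_iff m r i j).mpr h⟩
  have hAiff : ((r.map (fun i => (r.map (cA m r i)).sum)).sum ≠ 0) ↔ EA m := by
    rw [sum2_ne_zero_iff m r cA hAnn, ← exists_r_EA m, ← hr]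
    constructor
    · rintro ⟨i, hi, j, hj, h⟩; exact ⟨i, hi, j, hj, (cA_ne_iff m r i j).mp h⟩
    · rintro ⟨i, hi, j, hj, h⟩; exact ⟨i, hi, j, hj, (cA_ne_iff m r i j).mpr h⟩
  -- B's flag loop: rewrite masks lookups, then the pair-of-ors fold
  have hmask : ∀ i : Nat, i < m.length →
      ((List.range m.length).map (pvMaskRow m m.length)).getD i 0 = pvMaskRow m m.length i := by
    intro i hi
    rw [List.getD_eq_getElem?_getD]
    simp [hi]
  rw [show (List.range m.length).foldl (fun (s : Bool × Bool) i =>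
      let comp := (List.range m.length).foldl (fun c j =>
        if ((((List.range m.length).map (pvMaskRow m m.length)).getD i 0).testBit j) then
          c ||| ((List.range m.length).map (pvMaskRow m m.length)).getD j 0 else c) 0
      (s.1 || decide (comp &&& ((List.range m.length).map (pvMaskRow m m.length)).getD i 0 ≠ 0),
       s.2 || decide (comp &&& (((1 <<< m.length) - 1) ^^^
            ((List.range m.length).map (pvMaskRow m m.length)).getD i 0) ≠ 0))) (false, false)
    = (List.range m.length).foldl (fun (s : Bool × Bool) i =>
      let comp := (List.range m.length).foldl (fun c j =>
        if (pvMaskRow m m.length i).testBit j then c ||| pvMaskRow m m.length j else c) 0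
      (s.1 || decide (comp &&& pvMaskRow m m.length i ≠ 0),
       s.2 || decide (comp &&& (((1 <<< m.length) - 1) ^^^ pvMaskRow m m.length i) ≠ 0)))
        (false, false) from by
      apply PySem.List.foldl_congr_mem
      intro s i hi
      rw [List.mem_range] at hi
      rw [hmask i hi,
        show ((List.range m.length).foldl (fun c j =>
            if (pvMaskRow m m.length i).testBit j then
              c ||| ((List.range m.length).map (pvMaskRow m m.length)).getD j 0 else c) 0)
          = (List.range m.length).foldl (fun c j =>
            if (pvMaskRow m m.length i).testBit j then c ||| pvMaskRow m m.length j else c) 0 from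
          PySem.List.foldl_congr_mem _ _ _ _ (fun c j hj => by
            rw [List.mem_range] at hj
            by_cases hb : (pvMaskRow m m.length i).testBit j <;> simp [hb, List.getElem?_range, hj])]]
  rw [show (fun (s : Bool × Bool) i =>
      let comp := (List.range m.length).foldl (fun c j =>
        if (pvMaskRow m m.length i).testBit j then c ||| pvMaskRow m m.length j else c) 0
      (s.1 || decide (comp &&& pvMaskRow m m.length i ≠ 0),
       s.2 || decide (comp &&& (((1 <<< m.length) - 1) ^^^ pvMaskRow m m.length i) ≠ 0)))
    = (fun (s : Bool × Bool) i =>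
      (s.1 || (fun i => decide (((List.range m.length).foldl (fun c j =>
          if (pvMaskRow m m.length i).testBit j then c ||| pvMaskRow m m.length j else c) 0)
          &&& pvMaskRow m m.length i ≠ 0)) i,
       s.2 || (fun i => decide (((List.range m.length).foldl (fun c j =>
          if (pvMaskRow m m.length i).testBit j then c ||| pvMaskRow m m.length j else c) 0)
          &&& (((1 <<< m.length) - 1) ^^^ pvMaskRow m m.length i) ≠ 0)) i)) from rfl]
  rw [foldl_pair_or]
  simp only [Bool.false_or]
  -- Pre_ gives ET ∨ EA
  obtain ⟨hsq, i0, hi0, j0, hj0, k0, hk0, hij0, hjk0⟩ := hpre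
  have hPQ : ET m ∨ EA m := by
    by_cases hik : gN m i0 k0 = 0
    · right; exact ⟨i0, hi0, j0, hj0, k0, hk0, hij0, hjk0, hik⟩
    · left; exact ⟨i0, hi0, j0, hj0, k0, hk0, hij0, hjk0, hik⟩
  by_cases hE1 : ET m <;> by_cases hE2 : EA m
  · rw [(hasT_iff_ET m).mpr hE1, (hasAT_iff_EA m).mpr hE2,
        if_neg (fun h => (hAiff.mpr hE2) h.2),
        if_neg (fun h => (hTiff.mpr hE1) h.1),
        if_pos ⟨hTiff.mpr hE1, hAiff.mpr hE2⟩]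
    simp
  · have haz : (r.map (fun i => (r.map (cA m r i)).sum)).sum = 0 := by
      by_contra h; exact hE2 (hAiff.mp h)
    rw [(hasT_iff_ET m).mpr hE1,
        Bool.eq_false_iff.mpr (fun h => hE2 ((hasAT_iff_EA m).mp h)),
        if_pos ⟨hTiff.mpr hE1, haz⟩]
    simp
  · have htz : (r.map (fun i => (r.map (cT m r i)).sum)).sum = 0 := by
      by_contra h; exact hE1 (hTiff.mp h)
    rw [(hasAT_iff_EA m).mpr hE2,
        Bool.eq_false_iff.mpr (fun h => hE1 ((hasT_iff_ET m).mp h)),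
        if_neg (fun h => h.1 htz),
        if_pos ⟨htz, hAiff.mpr hE2⟩]
    simp
  · rcases hPQ with h | h
    · exact absurd h hE1
    · exact absurd h hE2
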